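-- pv_equiv track=rewrite | github.com/binyuman/jubilant-engine-crossword | dictionaryGetter.py | checkMultiplePlaces
-- ===== SOURCE A (Python) =====
-- def checkMultiplePlaces(letters) : #calculates how many sets of question marks exist
--
--     IN = False
--     count = 0
--
--     for index in range(0, len(letters)) :
--
--         if ord(letters[index]) == 63:
--
--             IN = True
--
--         else :
--
--             if IN :
--                 count += 1
--
--             IN = False
--
--     if IN :
--
--         count += 1
--
--     return count
-- ===== SOURCE B (Python) =====
-- def checkMultiplePlaces(letters):
--     # number of maximal runs of '?' = (count of '?') - (count of adjacent '??' pairs):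
--     # each run of length k contributes k marks and k-1 adjacencies, hence 1 to the difference.
--     q = [ord(c) == 63 for c in letters]
--     return sum(q) - sum(a and b for a, b in zip(q, q[1:]))
-- ===== Notes on version B (the rewrite author's own statement) =====
-- stated objective: alternative
-- what changed: Replaced the IN-flag state machine (with trailing-run fixup) by the arithmetic identity runs = #questionmarks - #adjacent '??' pairs, computed as two independent counts over the mark-indicator list and its pairwise zip.
import Mathlib
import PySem

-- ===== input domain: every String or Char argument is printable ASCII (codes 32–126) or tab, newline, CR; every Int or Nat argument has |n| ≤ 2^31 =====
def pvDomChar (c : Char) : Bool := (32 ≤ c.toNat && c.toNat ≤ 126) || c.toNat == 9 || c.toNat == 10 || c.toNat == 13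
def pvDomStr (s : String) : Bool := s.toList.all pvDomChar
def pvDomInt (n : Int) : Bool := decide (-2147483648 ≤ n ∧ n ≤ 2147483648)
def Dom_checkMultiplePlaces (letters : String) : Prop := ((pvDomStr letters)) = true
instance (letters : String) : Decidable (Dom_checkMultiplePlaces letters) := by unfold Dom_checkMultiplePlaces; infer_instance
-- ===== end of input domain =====

-- B replaces A's IN-flag state machine by the identity runs = #'?' - #adjacent '??' pairs,
-- two independent counts combined by subtraction (alternative decomposition, same O(n) cost).

-- ===== PORT A =====
-- loop state: (IN, count); after the loop, the trailing-run check
def checkMultiplePlaces (letters : String) : Int :=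
  let st := letters.toList.foldl
    (fun (s : Bool × Int) c =>
      if c.toNat == 63 then (true, s.2)
      else (false, if s.1 then s.2 + 1 else s.2))
    (false, 0)
  if st.1 then st.2 + 1 else st.2

-- ===== PORT B =====
-- q = [ord(c) == 63 for c in letters]; sum(q) - sum(a and b for a,b in zip(q, q[1:]))
def checkMultiplePlaces_alt (letters : String) : Int :=
  let q := letters.toList.map (fun c => c.toNat == 63)
  (q.foldl (fun (n : Int) b => if b then n + 1 else n) 0)
    - ((q.zip q.tail).foldl (fun (n : Int) p => if p.1 && p.2 then n + 1 else n) 0)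

-- ===== PRECONDITION & SPEC =====
def Spec_checkMultiplePlaces (letters : String) (out : Int) : Prop := out = checkMultiplePlaces_alt letters
instance (letters : String) (out : Int) : Decidable (Spec_checkMultiplePlaces letters out) := by unfold Spec_checkMultiplePlaces; infer_instance

-- ===== CLAIM (what is proved, stated in full; the proofs are below) =====
def Claim_equal_checkMultiplePlaces : Prop := ∀ (letters : String), Dom_checkMultiplePlaces letters → Spec_checkMultiplePlaces letters (checkMultiplePlaces letters)

-- ===== LEMMAS AND PROOFS =====
-- proof-only names for A's loop body/finalizer and recursive counters for B's two sums
def pvStep (s : Bool × Int) (c : Char) : Bool × Int :=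
  if c.toNat == 63 then (true, s.2) else (false, if s.1 then s.2 + 1 else s.2)

def pvFin (s : Bool × Int) : Int := if s.1 then s.2 + 1 else s.2

def pvCountT : List Bool → Int
  | [] => 0
  | x :: r => (if x then 1 else 0) + pvCountT r

def pvAdjC : Bool → List Bool → Int
  | _, [] => 0
  | p, x :: r => (if p && x then 1 else 0) + pvAdjC x r

theorem pvSum_eq (l : List Bool) : ∀ n : Int,
    l.foldl (fun (n : Int) b => if b then n + 1 else n) n = n + pvCountT l := by
  induction l with
  | nil => intro n; simp [pvCountT]
  | cons x r ih => intro n; cases x <;> simp [pvCountT, ih] <;> omega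

theorem pvZip_eq (l : List Bool) : ∀ (x : Bool) (n : Int),
    ((x :: l).zip l).foldl (fun (n : Int) p => if p.1 && p.2 then n + 1 else n) n
      = n + pvAdjC x l := by
  induction l with
  | nil => intro x n; simp [pvAdjC]
  | cons y r ih =>
    intro x n
    simp only [List.zip_cons_cons, List.foldl_cons, ih, pvAdjC]
    cases x <;> cases y <;> simp <;> omega

theorem pvFold_eq (l : List Char) : ∀ (b : Bool) (n : Int),
    pvFin (l.foldl pvStep (b, n))
      = n + pvCountT (l.map (fun c => c.toNat == 63))
          - pvAdjC b (l.map (fun c => c.toNat == 63))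
          + (if b then 1 else 0) := by
  induction l with
  | nil => intro b n; cases b <;> simp [pvCountT, pvAdjC, pvFin]
  | cons c rest ih =>
    intro b n
    rw [List.foldl_cons]
    by_cases h : (c.toNat == 63) = true
    · have hs : pvStep (b, n) c = (true, n) := by simp [pvStep, h]
      rw [hs, ih true n]
      simp only [List.map_cons, pvCountT, pvAdjC, h]
      cases b <;> simp <;> omega
    · have hs : pvStep (b, n) c = (false, if b then n + 1 else n) := by simp [pvStep, h]
      rw [hs]
      cases b <;>
        simp only [if_true, if_false, ih, List.map_cons, pvCountT, pvAdjC, h] <;>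
        simp [h] <;> omega

-- ===== VERDICT (by name: the statement is the Claim_ definition above) =====
theorem checkMultiplePlaces_spec : Claim_equal_checkMultiplePlaces := by
  intro letters _
  unfold Spec_checkMultiplePlaces
  have e : checkMultiplePlaces letters = pvFin (letters.toList.foldl pvStep (false, 0)) := rfl
  rw [e, pvFold_eq]
  unfold checkMultiplePlaces_alt
  cases hq : letters.toList.map (fun c => c.toNat == 63) with
  | nil => simp [pvCountT, pvAdjC]
  | cons x r =>
    simp only [List.tail_cons, pvSum_eq, pvZip_eq, pvCountT, pvAdjC]
    cases x <;> simp <;> omega
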